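-- pv_equiv track=rewrite | github.com/Vastargazing/rap-scraper-project | src/analyzers/algorithmic_analyzer.py | _phonetic_rhyme_check
-- ===== SOURCE A (Python) =====
-- def _phonetic_rhyme_check(word1: str, word2: str) -> bool:
--     """Perform phonetic rhyme checking using simplified phonetic groups.
--
--     Uses predefined phonetic groups for common sound patterns to determine
--     if two words rhyme based on their phonetic similarity rather than exact spelling.
--
--     Args:
--         word1 (str): First word to check for phonetic rhyming.
--         word2 (str): Second word to check for phonetic rhyming.
--
--     Returns:
--         bool: True if words rhyme phonetically according to the groups, False otherwise.
--
--     Note: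
--         This is a simplified implementation. A full phonetic matching algorithm
--         would be more comprehensive but this covers common English sound patterns.
--     """
--     # Simplified phonetic check
--     # In real implementation, there would be a phonetic matching algorithm
--
--     # Check for similar sounds
--     phonetic_groups = {
--         "k_sounds": ["c", "k", "ck", "q"],
--         "s_sounds": ["s", "c", "z"],
--         "f_sounds": ["f", "ph", "gh"],
--         "long_a": ["a", "ai", "ay", "ei"],
--         "long_e": ["e", "ee", "ea", "ie"],
--         "long_i": ["i", "ie", "y", "igh"],
--         "long_o": ["o", "oa", "ow", "ough"],
--         "long_u": ["u", "ue", "ew", "ou"],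
--     }
--
--     # Check endings for phonetic similarity
--     end1 = word1[-2:]
--     end2 = word2[-2:]
--
--     for group in phonetic_groups.values():
--         if any(end1.endswith(sound) for sound in group) and any(
--             end2.endswith(sound) for sound in group
--         ):
--             return True
--
--     return False
-- ===== SOURCE B (Python) =====
-- def _phonetic_rhyme_check(word1: str, word2: str) -> bool:
--     phonetic_groups = {
--         "k_sounds": ["c", "k", "ck", "q"],
--         "s_sounds": ["s", "c", "z"],
--         "f_sounds": ["f", "ph", "gh"],
--         "long_a": ["a", "ai", "ay", "ei"],
--         "long_e": ["e", "ee", "ea", "ie"],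
--         "long_i": ["i", "ie", "y", "igh"],
--         "long_o": ["o", "oa", "ow", "ough"],
--         "long_u": ["u", "ue", "ew", "ou"],
--     }
--
--     # Inverted index: exact sound string -> ids of the groups containing it.
--     # A 2-char ending can only end with one of its own (non-empty) suffixes,
--     # so two dict lookups per word replace all the endswith scans.
--     index = {}
--     for gid, sounds in enumerate(phonetic_groups.values()):
--         for s in sounds:
--             index.setdefault(s, set()).add(gid)
--
--     def groups_of(word):
--         end = word[-2:]
--         ids = set()
--         for j in range(len(end)):
--             ids |= index.get(end[j:], set())
--         return ids
--
--     return not groups_of(word1).isdisjoint(groups_of(word2))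
-- ===== Notes on version B (the rewrite author's own statement) =====
-- stated objective: alternative
-- what changed: Replaces A's per-group endswith scans by building an inverted index (exact sound string -> set of group ids) once, then computing each word's matching-group id set with one dict lookup per suffix of its 2-char ending and testing the two id sets for non-disjointness.
import Mathlib
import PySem

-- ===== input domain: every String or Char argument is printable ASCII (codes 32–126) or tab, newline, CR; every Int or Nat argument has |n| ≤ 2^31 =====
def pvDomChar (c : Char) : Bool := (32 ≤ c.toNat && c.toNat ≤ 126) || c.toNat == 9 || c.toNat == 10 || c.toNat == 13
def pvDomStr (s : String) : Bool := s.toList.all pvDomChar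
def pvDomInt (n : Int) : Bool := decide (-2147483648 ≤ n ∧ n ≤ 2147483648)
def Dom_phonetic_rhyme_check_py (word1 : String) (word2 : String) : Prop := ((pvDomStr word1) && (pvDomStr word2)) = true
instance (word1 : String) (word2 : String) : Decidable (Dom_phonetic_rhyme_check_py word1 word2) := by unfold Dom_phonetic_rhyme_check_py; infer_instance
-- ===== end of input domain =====

-- B replaces A's per-group endswith scans by an inverted index (sound -> set of group ids) built once, plus per-word suffix lookups and a disjointness test on the two id sets (alternative algorithm, same cost).


-- ===== PORT A =====
-- A-side loop over phonetic_groups.values() with early return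
def pvLoopA (end1 end2 : String) : List (List String) → Bool
  | [] => false
  | g :: rest =>
    if (g.any (fun sound => PySem.Str.endswith end1 sound)) &&
       (g.any (fun sound => PySem.Str.endswith end2 sound)) then true
    else pvLoopA end1 end2 rest

def phonetic_rhyme_check_py (word1 : String) (word2 : String) : Bool :=
  let phonetic_groups : PySem.Dict String (List String) :=
    PySem.Dict.mk
    [("k_sounds", ["c", "k", "ck", "q"]),
     ("s_sounds", ["s", "c", "z"]),
     ("f_sounds", ["f", "ph", "gh"]),
     ("long_a", ["a", "ai", "ay", "ei"]),
     ("long_e", ["e", "ee", "ea", "ie"]),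
     ("long_i", ["i", "ie", "y", "igh"]),
     ("long_o", ["o", "oa", "ow", "ough"]),
     ("long_u", ["u", "ue", "ew", "ou"])]
  let end1 := PySem.Str.slice word1 (some (-2)) none
  let end2 := PySem.Str.slice word2 (some (-2)) none
  pvLoopA end1 end2 (PySem.Dict.values phonetic_groups)

-- ===== PORT B =====
def pvDictB : PySem.Dict String (List String) :=
  PySem.Dict.mk
  [("k_sounds", ["c", "k", "ck", "q"]),
   ("s_sounds", ["s", "c", "z"]),
   ("f_sounds", ["f", "ph", "gh"]),
   ("long_a", ["a", "ai", "ay", "ei"]),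
   ("long_e", ["e", "ee", "ea", "ie"]),
   ("long_i", ["i", "ie", "y", "igh"]),
   ("long_o", ["o", "oa", "ow", "ough"]),
   ("long_u", ["u", "ue", "ew", "ou"])]

-- for gid, sounds in enumerate(...): for s in sounds: index.setdefault(s, set()).add(gid)
def pvIndexB : PySem.Dict String (PySem.Set Int) :=
  (PySem.List.enumerate (PySem.Dict.values pvDictB)).foldl
    (fun d p => p.2.foldl
      (fun d s => PySem.Dict.insert d s
        (PySem.Set.add (PySem.Dict.getD d s PySem.Set.empty) p.1)) d)
    (PySem.Dict.mk [])

-- ids = set(); for j in range(len(end)): ids |= index.get(end[j:], set())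
def pvGroupsOf (word : String) : PySem.Set Int :=
  let e := PySem.Str.slice word (some (-2)) none
  (PySem.List.pyRange 0 (PySem.Str.len e) 1).foldl
    (fun ids j => PySem.Set.union ids
      (PySem.Dict.getD pvIndexB (PySem.Str.slice e (some j) none) PySem.Set.empty))
    PySem.Set.empty

def phonetic_rhyme_check_py_alt (word1 : String) (word2 : String) : Bool :=
  !(PySem.Set.isdisjoint (pvGroupsOf word1) (pvGroupsOf word2))

-- ===== PRECONDITION & SPEC =====
def Spec_phonetic_rhyme_check_py (word1 : String) (word2 : String) (out : Bool) : Prop := out = phonetic_rhyme_check_py_alt word1 word2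
instance (word1 : String) (word2 : String) (out : Bool) : Decidable (Spec_phonetic_rhyme_check_py word1 word2 out) := by unfold Spec_phonetic_rhyme_check_py; infer_instance

-- ===== CLAIM (what is proved, stated in full; the proofs are below) =====
def Claim_equal_phonetic_rhyme_check_py : Prop := ∀ (word1 : String) (word2 : String), Dom_phonetic_rhyme_check_py word1 word2 → Spec_phonetic_rhyme_check_py word1 word2 (phonetic_rhyme_check_py word1 word2)

-- ===== LEMMAS AND PROOFS =====
-- the groups, enumerated, as a plain literal (proof-side view of both programs' data)
def pvEnumGroups : List (Int × List String) :=
  PySem.List.enumerate (PySem.Dict.values pvDictB)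

theorem pvLoopA_eq_any (end1 end2 : String) (L : List (List String)) :
    pvLoopA end1 end2 L =
      L.any (fun g => (g.any (fun sound => PySem.Str.endswith end1 sound)) &&
                      (g.any (fun sound => PySem.Str.endswith end2 sound))) := by
  induction L with
  | nil => rfl
  | cons g rest ih =>
    cases h : ((g.any (fun sound => PySem.Str.endswith end1 sound)) &&
              (g.any (fun sound => PySem.Str.endswith end2 sound))) with
    | true => simp only [pvLoopA, h, if_true, List.any_cons, Bool.true_or]
    | false => simp only [pvLoopA, h, Bool.false_eq_true, if_false, List.any_cons, ih,
        Bool.false_or]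

-- membership in the inverted-index lookup = "some enumerated group with this id contains s"
set_option maxHeartbeats 1000000 in
theorem pvMem_index (s : String) (i : Int) :
    i ∈ PySem.Dict.getD pvIndexB s PySem.Set.empty ↔
      ∃ p ∈ pvEnumGroups, p.1 = i ∧ s ∈ p.2 := by
  have h : pvIndexB = PySem.Dict.mk
    [("c", [0, 1]), ("k", [0]), ("ck", [0]), ("q", [0]), ("s", [1]), ("z", [1]), ("f", [2]), ("ph", [2]), ("gh", [2]),
     ("a", [3]), ("ai", [3]), ("ay", [3]), ("ei", [3]), ("e", [4]), ("ee", [4]), ("ea", [4]), ("ie", [4, 5]), ("i", [5]),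
     ("y", [5]), ("igh", [5]), ("o", [6]), ("oa", [6]), ("ow", [6]), ("ough", [6]), ("u", [7]), ("ue", [7]), ("ew", [7]),
     ("ou", [7])] := by decide
  rw [h]
  have he : pvEnumGroups =
    [(0, ["c", "k", "ck", "q"]), (1, ["s", "c", "z"]), (2, ["f", "ph", "gh"]),
     (3, ["a", "ai", "ay", "ei"]), (4, ["e", "ee", "ea", "ie"]), (5, ["i", "ie", "y", "igh"]),
     (6, ["o", "oa", "ow", "ough"]), (7, ["u", "ue", "ew", "ou"])] := by decide
  rw [he]
  simp only [PySem.Dict.getD, PySem.Dict.get?, List.find?_cons, List.mem_cons]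
  rcases eq_or_ne s "c" with rfl | h1
  · simp
    try omega
    try tauto
  have hb1 : ("c" == s) = false := beq_eq_false_iff_ne.mpr (Ne.symm h1)
  rcases eq_or_ne s "k" with rfl | h2
  · simp
    try omega
    try tauto
  have hb2 : ("k" == s) = false := beq_eq_false_iff_ne.mpr (Ne.symm h2)
  rcases eq_or_ne s "ck" with rfl | h3
  · simp
    try omega
    try tauto
  have hb3 : ("ck" == s) = false := beq_eq_false_iff_ne.mpr (Ne.symm h3)
  rcases eq_or_ne s "q" with rfl | h4
  · simp
    try omega
    try tauto
  have hb4 : ("q" == s) = false := beq_eq_false_iff_ne.mpr (Ne.symm h4)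
  rcases eq_or_ne s "s" with rfl | h5
  · simp
    try omega
    try tauto
  have hb5 : ("s" == s) = false := beq_eq_false_iff_ne.mpr (Ne.symm h5)
  rcases eq_or_ne s "z" with rfl | h6
  · simp
    try omega
    try tauto
  have hb6 : ("z" == s) = false := beq_eq_false_iff_ne.mpr (Ne.symm h6)
  rcases eq_or_ne s "f" with rfl | h7
  · simp
    try omega
    try tauto
  have hb7 : ("f" == s) = false := beq_eq_false_iff_ne.mpr (Ne.symm h7)
  rcases eq_or_ne s "ph" with rfl | h8
  · simp
    try omega
    try tauto
  have hb8 : ("ph" == s) = false := beq_eq_false_iff_ne.mpr (Ne.symm h8)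
  rcases eq_or_ne s "gh" with rfl | h9
  · simp
    try omega
    try tauto
  have hb9 : ("gh" == s) = false := beq_eq_false_iff_ne.mpr (Ne.symm h9)
  rcases eq_or_ne s "a" with rfl | h10
  · simp
    try omega
    try tauto
  have hb10 : ("a" == s) = false := beq_eq_false_iff_ne.mpr (Ne.symm h10)
  rcases eq_or_ne s "ai" with rfl | h11
  · simp
    try omega
    try tauto
  have hb11 : ("ai" == s) = false := beq_eq_false_iff_ne.mpr (Ne.symm h11)
  rcases eq_or_ne s "ay" with rfl | h12
  · simp
    try omega
    try tauto
  have hb12 : ("ay" == s) = false := beq_eq_false_iff_ne.mpr (Ne.symm h12)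
  rcases eq_or_ne s "ei" with rfl | h13
  · simp
    try omega
    try tauto
  have hb13 : ("ei" == s) = false := beq_eq_false_iff_ne.mpr (Ne.symm h13)
  rcases eq_or_ne s "e" with rfl | h14
  · simp
    try omega
    try tauto
  have hb14 : ("e" == s) = false := beq_eq_false_iff_ne.mpr (Ne.symm h14)
  rcases eq_or_ne s "ee" with rfl | h15
  · simp
    try omega
    try tauto
  have hb15 : ("ee" == s) = false := beq_eq_false_iff_ne.mpr (Ne.symm h15)
  rcases eq_or_ne s "ea" with rfl | h16
  · simp
    try omega
    try tauto
  have hb16 : ("ea" == s) = false := beq_eq_false_iff_ne.mpr (Ne.symm h16)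
  rcases eq_or_ne s "ie" with rfl | h17
  · simp
    try omega
    try tauto
  have hb17 : ("ie" == s) = false := beq_eq_false_iff_ne.mpr (Ne.symm h17)
  rcases eq_or_ne s "i" with rfl | h18
  · simp
    try omega
    try tauto
  have hb18 : ("i" == s) = false := beq_eq_false_iff_ne.mpr (Ne.symm h18)
  rcases eq_or_ne s "y" with rfl | h19
  · simp
    try omega
    try tauto
  have hb19 : ("y" == s) = false := beq_eq_false_iff_ne.mpr (Ne.symm h19)
  rcases eq_or_ne s "igh" with rfl | h20
  · simp
    try omega
    try tauto
  have hb20 : ("igh" == s) = false := beq_eq_false_iff_ne.mpr (Ne.symm h20)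
  rcases eq_or_ne s "o" with rfl | h21
  · simp
    try omega
    try tauto
  have hb21 : ("o" == s) = false := beq_eq_false_iff_ne.mpr (Ne.symm h21)
  rcases eq_or_ne s "oa" with rfl | h22
  · simp
    try omega
    try tauto
  have hb22 : ("oa" == s) = false := beq_eq_false_iff_ne.mpr (Ne.symm h22)
  rcases eq_or_ne s "ow" with rfl | h23
  · simp
    try omega
    try tauto
  have hb23 : ("ow" == s) = false := beq_eq_false_iff_ne.mpr (Ne.symm h23)
  rcases eq_or_ne s "ough" with rfl | h24
  · simp
    try omega
    try tauto
  have hb24 : ("ough" == s) = false := beq_eq_false_iff_ne.mpr (Ne.symm h24)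
  rcases eq_or_ne s "u" with rfl | h25
  · simp
    try omega
    try tauto
  have hb25 : ("u" == s) = false := beq_eq_false_iff_ne.mpr (Ne.symm h25)
  rcases eq_or_ne s "ue" with rfl | h26
  · simp
    try omega
    try tauto
  have hb26 : ("ue" == s) = false := beq_eq_false_iff_ne.mpr (Ne.symm h26)
  rcases eq_or_ne s "ew" with rfl | h27
  · simp
    try omega
    try tauto
  have hb27 : ("ew" == s) = false := beq_eq_false_iff_ne.mpr (Ne.symm h27)
  rcases eq_or_ne s "ou" with rfl | h28
  · simp
    try omega
    try tauto
  have hb28 : ("ou" == s) = false := beq_eq_false_iff_ne.mpr (Ne.symm h28)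
  simp only [hb1, hb2, hb3, hb4, hb5, hb6, hb7, hb8, hb9, hb10, hb11, hb12, hb13, hb14, hb15, hb16, hb17, hb18, hb19, hb20, hb21, hb22, hb23, hb24, hb25, hb26, hb27, hb28]
  simp_all

theorem pvKeysInj :
    ∀ p ∈ pvEnumGroups, ∀ q ∈ pvEnumGroups, p.1 = q.1 → p = q := by decide

theorem pvSounds_ne_nil : ∀ p ∈ pvEnumGroups, ∀ s ∈ p.2, s.toList ≠ [] := by decide

-- a 2-char ending matches a group iff the group contains the ending or its last char (A's endswith view = B's exact-suffix view)
theorem pvAny_two (g : List String) (hg : ∀ s ∈ g, s.toList ≠ []) (e k0 k1 : String)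
    (a b : Char) (he : e.toList = [a, b]) (hk0 : k0.toList = [a, b]) (hk1 : k1.toList = [b]) :
    (g.any (fun sound => PySem.Str.endswith e sound) = true) ↔ (k0 ∈ g ∨ k1 ∈ g) := by
  simp only [List.any_eq_true]
  constructor
  · rintro ⟨s, hs, hend⟩
    have h : s.toList <:+ e.toList := by
      rw [← PySem.Chars.endswith_iff]
      simpa using hend
    rw [he] at h
    rcases (by simpa [List.suffix_cons_iff] using h :
        s.toList = [a, b] ∨ s.toList = [b] ∨ s.toList = []) with h1 | h1 | h1
    · exact Or.inl (by rwa [String.toList_inj.mp (h1.trans hk0.symm)] at hs)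
    · exact Or.inr (by rwa [String.toList_inj.mp (h1.trans hk1.symm)] at hs)
    · exact absurd h1 (hg s hs)
  · rintro (h | h)
    · exact ⟨k0, h, by simp [PySem.Chars.endswith_iff, hk0, he]⟩
    · exact ⟨k1, h, by simp [PySem.Chars.endswith_iff, hk1, he]⟩

theorem pvAny_one (g : List String) (hg : ∀ s ∈ g, s.toList ≠ []) (e k0 : String)
    (a : Char) (he : e.toList = [a]) (hk0 : k0.toList = [a]) :
    (g.any (fun sound => PySem.Str.endswith e sound) = true) ↔ k0 ∈ g := by
  simp only [List.any_eq_true]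
  constructor
  · rintro ⟨s, hs, hend⟩
    have h : s.toList <:+ e.toList := by
      rw [← PySem.Chars.endswith_iff]
      simpa using hend
    rw [he] at h
    rcases (by simpa [List.suffix_cons_iff] using h :
        s.toList = [a] ∨ s.toList = []) with h1 | h1
    · exact (by rwa [String.toList_inj.mp (h1.trans hk0.symm)] at hs)
    · exact absurd h1 (hg s hs)
  · intro h
    exact ⟨k0, h, by simp [PySem.Chars.endswith_iff, hk0, he]⟩

theorem pvAny_zero (g : List String) (hg : ∀ s ∈ g, s.toList ≠ []) (e : String)
    (he : e.toList = []) :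
    (g.any (fun sound => PySem.Str.endswith e sound) = false) := by
  rw [List.any_eq_false]
  intro s hs hend
  have h : s.toList <:+ e.toList := by
    rw [← PySem.Chars.endswith_iff]
    simpa using hend
  rw [he] at h
  exact hg s hs (List.suffix_nil.mp h)

theorem pvMem_empty (i : Int) : i ∈ (PySem.Set.empty : PySem.Set Int) ↔ False := by
  simp [PySem.Set.empty]

-- per-word: i is in B's id set iff some enumerated group with id i matches the ending the way A tests it
theorem pvMem_groupsOf (word : String) (i : Int) :
    i ∈ pvGroupsOf word ↔
      ∃ p ∈ pvEnumGroups, p.1 = i ∧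
        p.2.any (fun sound =>
          PySem.Str.endswith (PySem.Str.slice word (some (-2)) none) sound) = true := by
  have hlen : (PySem.Str.slice word (some (-2)) none).toList.length ≤ 2 := by
    simp [PySem.List.slice_from_neg_ofNat _ 2 (by norm_num)]
    omega
  simp only [pvGroupsOf]
  generalize hE : PySem.Str.slice word (some (-2)) none = e at hlen ⊢
  have hu : ∀ (X Y : PySem.Set Int), i ∈ PySem.Set.union X Y ↔ i ∈ X ∨ i ∈ Y :=
    fun X Y => PySem.Set.mem_union X Y i
  rcases he : e.toList with _ | ⟨a, tl⟩
  · -- empty ending: no iterations, and nothing endswith-matches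
    have hr : PySem.List.pyRange 0 (PySem.Str.len e) 1 = [] := by
      rw [PySem.Str.len_eq, he]; decide
    rw [hr]
    simp only [List.foldl_nil, pvMem_empty, false_iff]
    rintro ⟨p, hp, _, hany⟩
    rw [pvAny_zero p.2 (pvSounds_ne_nil p hp) e he] at hany
    exact Bool.false_ne_true hany
  · rcases tl with _ | ⟨b, tl2⟩
    · -- one-char ending: one lookup, at the ending itself
      have hr : PySem.List.pyRange 0 (PySem.Str.len e) 1 = [0] := by
        rw [PySem.Str.len_eq, he]; norm_num; decide
      have hk0 : (PySem.Str.slice e (some 0) none).toList = [a] := by simp [he]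
      rw [hr]
      simp only [List.foldl_cons, List.foldl_nil, hu, pvMem_empty, false_or, pvMem_index]
      constructor
      · rintro ⟨p, hp, hpi, hk⟩
        exact ⟨p, hp, hpi,
          (pvAny_one p.2 (pvSounds_ne_nil p hp) e _ a he hk0).mpr hk⟩
      · rintro ⟨p, hp, hpi, hany⟩
        exact ⟨p, hp, hpi,
          (pvAny_one p.2 (pvSounds_ne_nil p hp) e _ a he hk0).mp hany⟩
    · rcases tl2 with _ | ⟨c, tl3⟩
      · -- two-char ending: lookups at the ending and at its last char
        have hr : PySem.List.pyRange 0 (PySem.Str.len e) 1 = [0, 1] := by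
          rw [PySem.Str.len_eq, he]; norm_num; decide
        have hk0 : (PySem.Str.slice e (some 0) none).toList = [a, b] := by simp [he]
        have hk1 : (PySem.Str.slice e (some 1) none).toList = [b] := by
          simp [PySem.List.slice_from_one, he]
        rw [hr]
        simp only [List.foldl_cons, List.foldl_nil, hu, pvMem_empty, false_or, pvMem_index]
        constructor
        · rintro (⟨p, hp, hpi, hk⟩ | ⟨p, hp, hpi, hk⟩)
          · exact ⟨p, hp, hpi,
              (pvAny_two p.2 (pvSounds_ne_nil p hp) e _ _ a b he hk0 hk1).mpr (Or.inl hk)⟩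
          · exact ⟨p, hp, hpi,
              (pvAny_two p.2 (pvSounds_ne_nil p hp) e _ _ a b he hk0 hk1).mpr (Or.inr hk)⟩
        · rintro ⟨p, hp, hpi, hany⟩
          rcases (pvAny_two p.2 (pvSounds_ne_nil p hp) e _ _ a b he hk0 hk1).mp hany with h | h
          · exact Or.inl ⟨p, hp, hpi, h⟩
          · exact Or.inr ⟨p, hp, hpi, h⟩
      · -- impossible: the slice has at most two characters
        exfalso
        rw [he] at hlen
        simp at hlen

-- ===== VERDICT (by name: the statement is the Claim_ definition above) =====
theorem phonetic_rhyme_check_py_spec : Claim_equal_phonetic_rhyme_check_py := by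
  intro word1 word2 _
  unfold Spec_phonetic_rhyme_check_py
  rw [Bool.eq_iff_iff]
  show pvLoopA (PySem.Str.slice word1 (some (-2)) none)
        (PySem.Str.slice word2 (some (-2)) none)
        (PySem.Dict.values pvDictB) = true ↔ _
  have hdisj : ∀ (A B : PySem.Set Int), (PySem.Set.isdisjoint A B) = false ↔ ∃ x, x ∈ A ∧ x ∈ B := by
    intro A B
    rw [← Bool.not_eq_true, PySem.Set.isdisjoint_iff]
    push Not
    rfl
  rw [pvLoopA_eq_any]
  have hvals : PySem.Dict.values pvDictB = pvEnumGroups.map Prod.snd := by decide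
  rw [hvals]
  simp only [phonetic_rhyme_check_py_alt, Bool.not_eq_eq_eq_not, Bool.not_true]
  rw [hdisj]
  simp only [List.any_eq_true, List.mem_map, Bool.and_eq_true]
  constructor
  · rintro ⟨g, ⟨p, hp, rfl⟩, h1, h2⟩
    exact ⟨p.1, (pvMem_groupsOf word1 p.1).mpr ⟨p, hp, rfl, by simpa using h1⟩,
           (pvMem_groupsOf word2 p.1).mpr ⟨p, hp, rfl, by simpa using h2⟩⟩
  · rintro ⟨i, hi1, hi2⟩
    obtain ⟨p, hp, hpi, h1⟩ := (pvMem_groupsOf word1 i).mp hi1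
    obtain ⟨q, hq, hqi, h2⟩ := (pvMem_groupsOf word2 i).mp hi2
    cases pvKeysInj p hp q hq (hpi.trans hqi.symm)
    exact ⟨p.2, ⟨p, hp, rfl⟩, by simpa using h1, by simpa using h2⟩
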